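-- pv_equiv track=rewrite | github.com/hongfu2019/PRG302 | guess_my_word.py | get_stats_from_log
-- ===== SOURCE A (Python) =====
-- def get_stats_from_log(log):
--     games_won = 0
--     games_played = 0
--     guesses_total = 0
--     won_game_guesses = 0
--     for score in log:
--         games_played += 1
--         if score[2] == score[3][-1]:
--             games_won += 1
--             won_game_guesses += len(score[3])
--         guesses_total += len(score[3])
--     return games_won, games_played, guesses_total, won_game_guesses
-- ===== SOURCE B (Python) =====
-- def get_stats_from_log(log):
--     # Divide and conquer: stats of a range = componentwise sum of the stats
--     # of its two halves; a single game is the base case.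
--     def merge(x, y):
--         return tuple(a + b for a, b in zip(x, y))
--
--     def solve(lo, hi):
--         if hi - lo == 0:
--             return (0, 0, 0, 0)
--         if hi - lo == 1:
--             s = log[lo]
--             n = len(s[3])
--             win = s[2] == s[3][-1]
--             return (1 if win else 0, 1, n, n if win else 0)
--         mid = (lo + hi) // 2
--         return merge(solve(lo, mid), solve(mid, hi))
--
--     return solve(0, len(log))
-- ===== Notes on version B (the rewrite author's own statement) =====
-- stated objective: alternative
-- what changed: Replaces A's single linear pass threading four mutable counters with a divide-and-conquer recursion: split the index range in half, compute the four stats for each half recursively (single game as base case), and merge them componentwise as a monoid.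
import Mathlib
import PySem

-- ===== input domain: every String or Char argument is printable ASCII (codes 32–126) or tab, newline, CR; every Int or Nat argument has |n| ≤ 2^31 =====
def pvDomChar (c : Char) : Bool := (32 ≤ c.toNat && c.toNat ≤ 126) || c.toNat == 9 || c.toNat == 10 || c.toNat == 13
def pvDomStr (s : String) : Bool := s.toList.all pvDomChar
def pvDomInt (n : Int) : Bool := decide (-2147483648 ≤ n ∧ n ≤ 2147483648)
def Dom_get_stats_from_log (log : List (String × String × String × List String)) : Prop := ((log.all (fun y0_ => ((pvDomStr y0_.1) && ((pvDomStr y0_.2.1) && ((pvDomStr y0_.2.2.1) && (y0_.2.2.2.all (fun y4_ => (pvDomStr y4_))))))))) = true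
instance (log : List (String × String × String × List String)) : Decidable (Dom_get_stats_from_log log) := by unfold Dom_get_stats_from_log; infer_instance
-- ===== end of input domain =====

-- B replaces A's single fused four-counter loop with a divide-and-conquer
-- recursion on the index range, merging half-results componentwise
-- (objective: alternative; same asymptotic cost, different algorithm shape).

-- ===== PORT A =====
-- one loop iteration of A: the four counters threaded through the for-loop
def pvStepA (st : Int × Int × Int × Int) (score : String × String × String × List String) :
    Int × Int × Int × Int :=
  let gp := st.2.1 + 1
  -- score[2] == score[3][-1]; pyGet? is none exactly where Python raises IndexError (excluded by Pre_)
  if PySem.List.pyGet? score.2.2.2 (-1) = some score.2.2.1 then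
    (st.1 + 1, gp, st.2.2.1 + (score.2.2.2.length : Int), st.2.2.2 + (score.2.2.2.length : Int))
  else
    (st.1, gp, st.2.2.1 + (score.2.2.2.length : Int), st.2.2.2)

def get_stats_from_log (log : List (String × String × String × List String)) : Int × Int × Int × Int :=
  log.foldl pvStepA (0, 0, 0, 0)

-- ===== PORT B =====
-- merge(x, y): componentwise sum of the two stat 4-tuples
def pvMerge (x y : Int × Int × Int × Int) : Int × Int × Int × Int :=
  (x.1 + y.1, x.2.1 + y.2.1, x.2.2.1 + y.2.2.1, x.2.2.2 + y.2.2.2)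

-- solve(lo, hi): stats of log[lo:hi] by splitting the range in half.
-- The first Nat argument is a FUEL guard that only makes the recursion structural
-- (it starts at hi - lo and never runs out, since each half of a range of size
-- ≥ 2 has size ≤ hi - lo - 1); the computation is exactly Source B's solve.
def pvSolveGo (log : List (String × String × String × List String)) :
    Nat → Nat → Nat → Int × Int × Int × Int
  | 0, _, _ => (0, 0, 0, 0)    -- reached only with hi - lo = 0, where solve returns (0, 0, 0, 0)
  | fuel + 1, lo, hi =>
    if hi - lo = 0 then (0, 0, 0, 0)
    else if hi - lo = 1 then
      -- s = log[lo]; index is always in range in B's calls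
      let s := log.getD lo ("", "", "", [])
      let n : Int := (s.2.2.2.length : Int)
      -- win = s[2] == s[3][-1]; pyGet? none = IndexError (excluded by Pre_)
      let win := PySem.List.pyGet? s.2.2.2 (-1) = some s.2.2.1
      ((if win then 1 else 0), 1, n, if win then n else 0)
    else
      let mid := (lo + hi) / 2
      pvMerge (pvSolveGo log fuel lo mid) (pvSolveGo log fuel mid hi)

def get_stats_from_log_alt (log : List (String × String × String × List String)) : Int × Int × Int × Int :=
  pvSolveGo log log.length 0 log.length

-- ===== PRECONDITION & SPEC =====
-- Pre_ excludes exactly the logs containing an entry with an empty guess list,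
-- on which Python A raises IndexError at score[3][-1] (B raises there too).
def Pre_get_stats_from_log (log : List (String × String × String × List String)) : Prop :=
  ∀ s ∈ log, s.2.2.2 ≠ []
instance (log : List (String × String × String × List String)) : Decidable (Pre_get_stats_from_log log) := by unfold Pre_get_stats_from_log; infer_instance

def pvWitness_get_stats_from_log : (List (String × String × String × List String)) :=
  [("p", "w", "w", ["a", "w"]), ("q", "x", "y", ["y"])]

def Spec_get_stats_from_log (log : List (String × String × String × List String)) (out : Int × Int × Int × Int) : Prop := out = get_stats_from_log_alt log
instance (log : List (String × String × String × List String)) (out : Int × Int × Int × Int) : Decidable (Spec_get_stats_from_log log out) := by unfold Spec_get_stats_from_log; infer_instance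

-- ===== CLAIM (what is proved, stated in full; the proofs are below) =====
def Claim_equal_get_stats_from_log : Prop := ∀ (log : List (String × String × String × List String)), Dom_get_stats_from_log log → Pre_get_stats_from_log log → Spec_get_stats_from_log log (get_stats_from_log log)

-- ===== LEMMAS AND PROOFS =====

-- the four quantities as functions of a list segment (proof vocabulary only)
def pvWon (xs : List (String × String × String × List String)) :
    List (String × String × String × List String) :=
  xs.filter (fun s => PySem.List.pyGet? s.2.2.2 (-1) = some s.2.2.1)

def pvGuessSum (xs : List (String × String × String × List String)) : Int :=
  (xs.map (fun s => (s.2.2.2.length : Int))).sum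

def pvStats (xs : List (String × String × String × List String)) : Int × Int × Int × Int :=
  ((pvWon xs).length, (xs.length : Int), pvGuessSum xs, pvGuessSum (pvWon xs))

theorem pvStats_append (xs ys : List (String × String × String × List String)) :
    pvStats (xs ++ ys) = pvMerge (pvStats xs) (pvStats ys) := by
  simp [pvStats, pvMerge, pvWon, pvGuessSum, List.filter_append]

theorem pvStats_single (s : String × String × String × List String) :
    pvStats [s] =
      ((if PySem.List.pyGet? s.2.2.2 (-1) = some s.2.2.1 then 1 else 0), 1,
       (s.2.2.2.length : Int),
       if PySem.List.pyGet? s.2.2.2 (-1) = some s.2.2.1 then (s.2.2.2.length : Int) else 0) := by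
  by_cases h : PySem.List.pyGet? s.2.2.2 (-1) = some s.2.2.1 <;>
    simp [pvStats, pvWon, pvGuessSum, h]

-- the divide-and-conquer recursion computes pvStats of the segment log[lo:hi]
theorem pvSolve_eq (log : List (String × String × String × List String)) :
    ∀ (n lo hi : Nat), hi - lo ≤ n → hi ≤ log.length →
      pvSolveGo log n lo hi = pvStats ((log.drop lo).take (hi - lo)) := by
  intro n
  induction n with
  | zero =>
    intro lo hi hn hhi
    have h0 : hi - lo = 0 := by omega
    simp [pvSolveGo, h0, pvStats, pvWon, pvGuessSum]
  | succ n ih =>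
    intro lo hi hn hhi
    rw [pvSolveGo]
    by_cases h0 : hi - lo = 0
    · simp [h0, pvStats, pvWon, pvGuessSum]
    · by_cases h1 : hi - lo = 1
      · have hlo : lo < log.length := by omega
        have hdrop := List.drop_eq_getElem_cons hlo
        simp only [h1]
        norm_num
        rw [hdrop]
        simp only [List.take_succ_cons, List.take_zero]
        rw [pvStats_single]
        simp [List.getElem?_eq_getElem hlo]
      · simp only [if_neg h0, if_neg h1]
        have hm1 : (lo + hi) / 2 - lo ≤ n := by omega
        have hm2 : hi - (lo + hi) / 2 ≤ n := by omega
        have hle : (lo + hi) / 2 <= log.length := by omega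
        rw [ih lo ((lo + hi) / 2) hm1 hle, ih ((lo + hi) / 2) hi hm2 hhi]
        rw [← pvStats_append]
        congr 1
        have hsplit : hi - lo = ((lo + hi) / 2 - lo) + (hi - (lo + hi) / 2) := by omega
        rw [hsplit, List.take_add]
        congr 1
        rw [List.drop_drop]
        have hmid : lo + ((lo + hi) / 2 - lo) = (lo + hi) / 2 := by omega
        rw [hmid]

-- A's fold equals pvStats, from any start state
theorem pvFoldA_char (log : List (String × String × String × List String))
    (a b c d : Int) :
    log.foldl pvStepA (a, b, c, d) =
      (a + (pvStats log).1, b + (pvStats log).2.1,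
       c + (pvStats log).2.2.1, d + (pvStats log).2.2.2) := by
  induction log generalizing a b c d with
  | nil => simp [pvStats, pvWon, pvGuessSum]
  | cons s t ih =>
    by_cases h : PySem.List.pyGet? s.2.2.2 (-1) = some s.2.2.1 <;>
      · simp only [List.foldl_cons, pvStepA, h, reduceIte]
        rw [ih]
        simp [pvStats, pvWon, pvGuessSum, h]
        and_intros <;> ring

-- ===== VERDICT (by name: the statement is the Claim_ definition above) =====
theorem get_stats_from_log_spec : Claim_equal_get_stats_from_log := by
  intro log _ _
  unfold Spec_get_stats_from_log get_stats_from_log get_stats_from_log_alt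
  rw [pvFoldA_char, pvSolve_eq log log.length 0 log.length (by omega) (by omega)]
  simp
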